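-- pv_equiv track=rewrite | github.com/AlexWUrobot/leetcode_python | max_profit.py | contprofit
-- ===== SOURCE A (Python) =====
-- def contprofit(arr, k):
--     profits = 0
--     if 2*k == len(arr):
--         return sum(arr)  # boundary condition, select all
--
--     for i in range(len(arr) - k):
--         window = sum(arr[i : i + k])
--         for j in range(i + k, len(arr)):
--             nextwindow = sum(arr[j : j + k])
--             if j + k > len(arr) - 1:
--                 diff = (j + k) - len(arr)
--                 nextwindow += sum(arr[0:diff])
--             profits = max(profits, window + nextwindow)
--     return profits
-- ===== SOURCE B (Python) =====
-- def contprofit(arr, k):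
--     n = len(arr)
--     if 2 * k == n:
--         return sum(arr)
--     prefix = [0]
--     s = 0
--     for x in arr:
--         s += x
--         prefix.append(s)
--     best = 0
--     m = None
--     for i in range(n - k - 1, -1, -1):
--         j = i + k
--         w = prefix[min(j + k, n)] - prefix[j] + prefix[min(max(j + k - n, 0), n)]
--         m = w if m is None else max(m, w)
--         best = max(best, prefix[i + k] - prefix[i] + m)
--     return best
-- ===== Notes on version B (the rewrite author's own statement) =====
-- stated objective: faster
-- what changed: Replaces A's enumeration of all (first-window, second-window) pairs with repeated slice summation by one prefix-sum pass plus a single descending sweep that keeps the running maximum of the wrapped second window.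
-- outside the precondition, e.g. on contprofit([1, 2, 3, 4, 5], -1): A returns 20, B returns 30
import Mathlib
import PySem

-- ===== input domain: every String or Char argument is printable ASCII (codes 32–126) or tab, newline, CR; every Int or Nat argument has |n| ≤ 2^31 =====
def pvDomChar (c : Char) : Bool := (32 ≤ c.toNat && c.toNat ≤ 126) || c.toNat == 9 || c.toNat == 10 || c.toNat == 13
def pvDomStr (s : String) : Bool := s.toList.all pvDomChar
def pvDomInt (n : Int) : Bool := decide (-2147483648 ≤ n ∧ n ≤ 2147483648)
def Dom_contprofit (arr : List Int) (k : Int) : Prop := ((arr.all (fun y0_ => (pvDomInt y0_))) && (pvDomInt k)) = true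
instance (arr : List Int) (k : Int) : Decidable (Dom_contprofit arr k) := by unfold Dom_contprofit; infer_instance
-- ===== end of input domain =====

-- B replaces A's O(n^2·k) pair enumeration by prefix sums and a single descending
-- sweep that maintains the running maximum of the wrapped second window (O(n)).

-- ===== PORT A =====
def contprofit (arr : List Int) (k : Int) : Int :=
  if 2 * k = PySem.List.len arr then arr.sum
  else
    (PySem.List.pyRange 0 (PySem.List.len arr - k) 1).foldl (fun profits i =>
      let window := (PySem.List.slice arr (some i) (some (i + k))).sum
      (PySem.List.pyRange (i + k) (PySem.List.len arr) 1).foldl (fun profits j =>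
        let nextwindow := (PySem.List.slice arr (some j) (some (j + k))).sum
        let nextwindow := if j + k > PySem.List.len arr - 1
          then nextwindow + (PySem.List.slice arr (some 0) (some (j + k - PySem.List.len arr))).sum
          else nextwindow
        max profits (window + nextwindow)) profits) 0

-- ===== PORT B =====
def contprofit_alt (arr : List Int) (k : Int) : Int :=
  let n : Int := PySem.List.len arr
  if 2 * k = n then arr.sum
  else
    let pfx := (arr.foldl (fun (st : List Int × Int) x =>
      let s := st.2 + x
      (st.1 ++ [s], s)) ([(0 : Int)], 0)).1
    ((PySem.List.pyRange (n - k - 1) (-1) (-1)).foldl (fun (bm : Int × Option Int) i =>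
      let j := i + k
      let w := PySem.List.pyGetD pfx (min (j + k) n) 0 - PySem.List.pyGetD pfx j 0
               + PySem.List.pyGetD pfx (min (max (j + k - n) 0) n) 0
      let m := match bm.2 with
        | none => w
        | some m0 => max m0 w
      (max bm.1 (PySem.List.pyGetD pfx (i + k) 0 - PySem.List.pyGetD pfx i 0 + m), some m))
      ((0 : Int), (none : Option Int))).1

-- ===== PRECONDITION & SPEC =====
-- Pre_ excludes negative window sizes k, outside the function's natural domain: there
-- A's value is an artefact of Python's negative-slice wraparound and B does not match it.
def Pre_contprofit (arr : List Int) (k : Int) : Prop := 0 ≤ k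
instance (arr : List Int) (k : Int) : Decidable (Pre_contprofit arr k) := by unfold Pre_contprofit; infer_instance
def pvWitness_contprofit : List Int × Int := ([3, -1, 2, 5], 1)

def Spec_contprofit (arr : List Int) (k : Int) (out : Int) : Prop := out = contprofit_alt arr k
instance (arr : List Int) (k : Int) (out : Int) : Decidable (Spec_contprofit arr k out) := by unfold Spec_contprofit; infer_instance

-- ===== CLAIM (what is proved, stated in full; the proofs are below) =====
def Claim_equal_contprofit : Prop := ∀ (arr : List Int) (k : Int), Dom_contprofit arr k → Pre_contprofit arr k → Spec_contprofit arr k (contprofit arr k)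

-- ===== LEMMAS AND PROOFS =====

-- sum of the first window starting at i
def pvS (arr : List Int) (kn i : ℕ) : ℤ := ((arr.drop i).take kn).sum
-- sum of the (wrapping) second window starting at j
def pvW (arr : List Int) (kn j : ℕ) : ℤ :=
  ((arr.drop j).take kn).sum + (arr.take (j + kn - arr.length)).sum
-- max of pvW over [u, arr.length)
def pvMval (arr : List Int) (kn u : ℕ) : ℤ :=
  if _ : u + 1 < arr.length then max (pvW arr kn u) (pvMval arr kn (u + 1))
  else pvW arr kn u
termination_by arr.length - u

theorem pvFmax_shift (g : ℕ → ℤ) (l : List ℕ) : ∀ (acc c : ℤ),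
    l.foldl (fun a x => max a (g x)) (max acc c) = max (l.foldl (fun a x => max a (g x)) acc) c := by
  induction l with
  | nil => intro acc c; rfl
  | cons x l ih =>
    intro acc c
    simp only [List.foldl_cons]
    rw [show max (max acc c) (g x) = max (max acc (g x)) c by
      rw [max_assoc, max_comm c (g x), ← max_assoc], ih]

theorem pvFmax_reverse (g : ℕ → ℤ) (l : List ℕ) : ∀ (acc : ℤ),
    l.reverse.foldl (fun a x => max a (g x)) acc = l.foldl (fun a x => max a (g x)) acc := by
  induction l with
  | nil => intro acc; rfl
  | cons x l ih =>
    intro acc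
    simp only [List.reverse_cons, List.foldl_append, List.foldl_cons, List.foldl_nil, ih]
    rw [← pvFmax_shift]

theorem pvPrefix_spec (arr : List Int) : ∀ (acc : List Int) (s : Int),
    (arr.foldl (fun (st : List Int × Int) x => let s := st.2 + x; (st.1 ++ [s], s)) (acc, s))
      = (acc ++ (List.range arr.length).map (fun m => s + (arr.take (m + 1)).sum), s + arr.sum) := by
  induction arr with
  | nil => intro acc s; simp
  | cons x xs ih =>
    intro acc s
    simp only [List.foldl_cons, ih, List.length_cons, List.range_succ_eq_map, List.map_cons,
      List.map_map, List.take_succ_cons, List.sum_cons, List.take_zero, List.sum_nil,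
      List.append_assoc, List.singleton_append, Prod.mk.injEq]
    refine ⟨?_, by ring⟩
    rw [show ((fun m => s + (x + (List.take m xs).sum)) ∘ Nat.succ)
        = (fun m => s + x + (List.take (m + 1) xs).sum) from by
      funext m; simp only [Function.comp_apply, Nat.succ_eq_add_one]; ring]
    norm_num

theorem pvPrefix_getD (arr : List Int) (m : ℕ) (hm : m ≤ arr.length) :
    ((arr.foldl (fun (st : List Int × Int) x => let s := st.2 + x; (st.1 ++ [s], s)) ([(0:Int)], 0)).1).getD m 0
      = (arr.take m).sum := by
  rw [pvPrefix_spec]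
  cases m with
  | zero => simp
  | succ m' =>
    have hm' : m' < arr.length := by omega
    simp [List.getD, hm']

-- A's inner-loop body value equals pvW
theorem pvNext_eq (arr : List Int) (kn j : ℕ) :
    (if (j:ℤ) + (kn:ℤ) > (arr.length:ℤ) - 1
     then (PySem.List.slice arr (some (j:ℤ)) (some ((j:ℤ)+(kn:ℤ)))).sum
          + (PySem.List.slice arr (some 0) (some ((j:ℤ)+(kn:ℤ)-(arr.length:ℤ)))).sum
     else (PySem.List.slice arr (some (j:ℤ)) (some ((j:ℤ)+(kn:ℤ)))).sum) = pvW arr kn j := by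
  rw [PySem.List.slice_natCast_add]
  split_ifs with h
  · have h1 : (j:ℤ)+(kn:ℤ)-(arr.length:ℤ) = ((j+kn-arr.length : ℕ) : ℤ) := by omega
    rw [h1]
    rw [PySem.List.slice_zero_start, PySem.List.slice_to_natCast]
    rfl
  · have h0 : j + kn - arr.length = 0 := by omega
    unfold pvW
    rw [h0]
    simp

-- prefix-sum differences give window sums
theorem pvTake_sub (arr : List Int) (kn j : ℕ) :
    (arr.take (j + kn)).sum - (arr.take j).sum = ((arr.drop j).take kn).sum := by
  rw [show j + kn = j + kn from rfl, List.take_add, List.sum_append]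
  ring

theorem pvMval_pos (arr : List Int) (kn u : ℕ) (h : u + 1 < arr.length) :
    pvMval arr kn u = max (pvW arr kn u) (pvMval arr kn (u + 1)) := by
  rw [pvMval]; simp [h]

theorem pvMval_last (arr : List Int) (kn u : ℕ) (h : ¬ (u + 1 < arr.length)) :
    pvMval arr kn u = pvW arr kn u := by
  rw [pvMval]; simp [h]

-- A's inner loop over j ∈ [u, n) computes max acc (c + pvMval u)
theorem pvInnerMax (arr : List Int) (kn : ℕ) (c : ℤ) : ∀ (m u : ℕ) (acc : ℤ),
    u + m = arr.length → 0 < m →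
    (List.range m).foldl (fun a d => max a (c + pvW arr kn (u + d))) acc
      = max acc (c + pvMval arr kn u) := by
  intro m
  induction m with
  | zero => intro u acc _ h0; exact absurd h0 (lt_irrefl 0)
  | succ m ih =>
    intro u acc hun _
    rw [List.range_succ_eq_map]
    simp only [List.foldl_cons, List.foldl_map, Nat.add_zero]
    have hbody : (fun (a:ℤ) (d:ℕ) => max a (c + pvW arr kn (u + (d + 1))))
        = (fun (a:ℤ) (d:ℕ) => max a (c + pvW arr kn ((u+1) + d))) := by
      funext a d; rw [show u + (d+1) = (u+1)+d from by omega]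
    cases Nat.eq_zero_or_pos m with
    | inl h0 =>
      subst h0
      simp only [List.range_zero, List.foldl_nil]
      rw [pvMval_last arr kn u (by omega)]
    | inr hpos =>
      rw [hbody, ih (u+1) _ (by omega) hpos]
      rw [pvMval_pos arr kn u (by omega)]
      rw [max_assoc, max_add_add_left]

-- B's descending sweep with running maximum equals the fold of pvS + pvMval
theorem pvBInv (arr : List Int) (kn : ℕ) (hkn : kn < arr.length) : ∀ (t : ℕ) (b0 : ℤ),
    t ≤ arr.length - kn →
    ((List.range t).reverse.foldl (fun (bm : ℤ × Option ℤ) i =>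
        let m := match bm.2 with
          | none => pvW arr kn (i + kn)
          | some m0 => max m0 (pvW arr kn (i + kn))
        (max bm.1 (pvS arr kn i + m), some m))
      (b0, if t = arr.length - kn then none else some (pvMval arr kn (t + kn)))).1
    = (List.range t).reverse.foldl (fun a i => max a (pvS arr kn i + pvMval arr kn (i + kn))) b0 := by
  intro t
  induction t with
  | zero => intro b0 _; rfl
  | succ t ih =>
    intro b0 ht
    rw [List.range_succ, List.reverse_append]
    simp only [List.reverse_cons, List.reverse_nil, List.nil_append, List.cons_append,
      List.foldl_cons, List.nil_append]
    have hm : (match (if t + 1 = arr.length - kn then (none : Option ℤ)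
                 else some (pvMval arr kn (t + 1 + kn))) with
        | none => pvW arr kn (t + kn)
        | some m0 => max m0 (pvW arr kn (t + kn))) = pvMval arr kn (t + kn) := by
      by_cases hc : t + 1 = arr.length - kn
      · rw [if_pos hc]
        show pvW arr kn (t + kn) = pvMval arr kn (t + kn)
        rw [pvMval_last arr kn (t + kn) (by omega)]
      · rw [if_neg hc]
        show max (pvMval arr kn (t + 1 + kn)) (pvW arr kn (t + kn)) = pvMval arr kn (t + kn)
        rw [show t + 1 + kn = t + kn + 1 from by omega]
        rw [pvMval_pos arr kn (t + kn) (by omega)]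
        exact max_comm _ _
    rw [hm]
    have hne : ¬ (t = arr.length - kn) := by omega
    have hih := ih (max b0 (pvS arr kn t + pvMval arr kn (t + kn))) (by omega)
    rw [if_neg hne] at hih
    exact hih

-- ===== VERDICT (by name: the statement is the Claim_ definition above) =====
theorem contprofit_spec : Claim_equal_contprofit := by
  unfold Claim_equal_contprofit Spec_contprofit Pre_contprofit
  intro arr k _ hk
  obtain ⟨kn, rfl⟩ := Int.eq_ofNat_of_zero_le hk
  unfold contprofit contprofit_alt
  simp only [PySem.List.len_eq]
  by_cases hb : 2 * (kn:ℤ) = (arr.length : ℤ)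
  · simp [hb]
  · rw [if_neg hb, if_neg hb]
    by_cases hnk : (arr.length : ℤ) - (kn:ℤ) ≤ 0
    · rw [PySem.List.pyRange_one_eq_nil (by omega), PySem.List.pyRange_neg_one_eq_nil (by omega)]
      rfl
    have hkn : kn < arr.length := by omega
    -- A side
    have hA : (PySem.List.pyRange 0 ((arr.length:ℤ) - (kn:ℤ)) 1).foldl (fun profits i =>
        (PySem.List.pyRange (i + (kn:ℤ)) (arr.length:ℤ) 1).foldl (fun profits j =>
          max profits ((PySem.List.slice arr (some i) (some (i + (kn:ℤ)))).sum +
            (if j + (kn:ℤ) > (arr.length:ℤ) - 1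
             then (PySem.List.slice arr (some j) (some (j + (kn:ℤ)))).sum
                + (PySem.List.slice arr (some 0) (some (j + (kn:ℤ) - (arr.length:ℤ)))).sum
             else (PySem.List.slice arr (some j) (some (j + (kn:ℤ)))).sum))) profits) 0
        = (List.range (arr.length - kn)).foldl
            (fun a i => max a (pvS arr kn i + pvMval arr kn (i + kn))) 0 := by
      rw [PySem.List.pyRange_one]
      rw [show (((arr.length:ℤ) - (kn:ℤ)) - 0).toNat = arr.length - kn from by omega]
      rw [List.foldl_map]
      apply PySem.List.foldl_congr_mem
      intro acc t htmem
      have ht : t < arr.length - kn := List.mem_range.mp htmem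
      -- the first window
      have hw : (PySem.List.slice arr (some ((0:ℤ) + (t:ℤ))) (some ((0:ℤ) + (t:ℤ) + (kn:ℤ)))).sum
          = pvS arr kn t := by
        rw [show ((0:ℤ) + (t:ℤ)) = ((t:ℕ):ℤ) from by omega]
        rw [PySem.List.slice_natCast_add]
        rfl
      -- inner range
      rw [PySem.List.pyRange_one]
      rw [show (((arr.length:ℤ)) - ((0:ℤ) + (t:ℤ) + (kn:ℤ))).toNat = arr.length - (t + kn) from by omega]
      rw [List.foldl_map]
      have hbody : (fun (a:ℤ) (d:ℕ) =>
          max a ((PySem.List.slice arr (some ((0:ℤ) + (t:ℤ))) (some ((0:ℤ) + (t:ℤ) + (kn:ℤ)))).sum +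
            (if ((0:ℤ) + (t:ℤ) + (kn:ℤ) + (d:ℤ)) + (kn:ℤ) > (arr.length:ℤ) - 1
             then (PySem.List.slice arr (some ((0:ℤ) + (t:ℤ) + (kn:ℤ) + (d:ℤ))) (some (((0:ℤ) + (t:ℤ) + (kn:ℤ) + (d:ℤ)) + (kn:ℤ)))).sum
                + (PySem.List.slice arr (some 0) (some (((0:ℤ) + (t:ℤ) + (kn:ℤ) + (d:ℤ)) + (kn:ℤ) - (arr.length:ℤ)))).sum
             else (PySem.List.slice arr (some ((0:ℤ) + (t:ℤ) + (kn:ℤ) + (d:ℤ))) (some (((0:ℤ) + (t:ℤ) + (kn:ℤ) + (d:ℤ)) + (kn:ℤ)))).sum)))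
          = (fun (a:ℤ) (d:ℕ) => max a (pvS arr kn t + pvW arr kn ((t + kn) + d))) := by
        funext a d
        rw [hw]
        rw [show ((0:ℤ) + (t:ℤ) + (kn:ℤ) + (d:ℤ)) = (((t + kn + d : ℕ)):ℤ) from by push_cast; ring]
        rw [pvNext_eq arr kn (t + kn + d)]
      rw [hbody]
      rw [pvInnerMax arr kn (pvS arr kn t) (arr.length - (t + kn)) (t + kn) acc (by omega) (by omega)]
    rw [hA]
    -- B side
    have hpfx : ∀ (m : ℕ), m ≤ arr.length →
        PySem.List.pyGetD ((arr.foldl (fun (st : List Int × Int) x =>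
          let s := st.2 + x; (st.1 ++ [s], s)) ([(0:Int)], 0)).1) ((m:ℕ):ℤ) 0
          = (arr.take m).sum := by
      intro m hm
      rw [PySem.List.pyGetD_natCast]
      exact pvPrefix_getD arr m hm
    have hB : (PySem.List.pyRange ((arr.length:ℤ) - (kn:ℤ) - 1) (-1) (-1)).foldl
        (fun (bm : Int × Option Int) i =>
          let j := i + (kn:ℤ)
          let w := PySem.List.pyGetD ((arr.foldl (fun (st : List Int × Int) x =>
              let s := st.2 + x; (st.1 ++ [s], s)) ([(0:Int)], 0)).1) (min (j + (kn:ℤ)) (arr.length:ℤ)) 0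
            - PySem.List.pyGetD ((arr.foldl (fun (st : List Int × Int) x =>
              let s := st.2 + x; (st.1 ++ [s], s)) ([(0:Int)], 0)).1) j 0
            + PySem.List.pyGetD ((arr.foldl (fun (st : List Int × Int) x =>
              let s := st.2 + x; (st.1 ++ [s], s)) ([(0:Int)], 0)).1) (min (max (j + (kn:ℤ) - (arr.length:ℤ)) 0) (arr.length:ℤ)) 0
          let m := match bm.2 with
            | none => w
            | some m0 => max m0 w
          (max bm.1 (PySem.List.pyGetD ((arr.foldl (fun (st : List Int × Int) x =>
              let s := st.2 + x; (st.1 ++ [s], s)) ([(0:Int)], 0)).1) (i + (kn:ℤ)) 0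
            - PySem.List.pyGetD ((arr.foldl (fun (st : List Int × Int) x =>
              let s := st.2 + x; (st.1 ++ [s], s)) ([(0:Int)], 0)).1) i 0 + m), some m))
        ((0:Int), (none : Option Int))
        = ((List.range (arr.length - kn)).reverse.foldl (fun (bm : ℤ × Option ℤ) i =>
            let m := match bm.2 with
              | none => pvW arr kn (i + kn)
              | some m0 => max m0 (pvW arr kn (i + kn))
            (max bm.1 (pvS arr kn i + m), some m))
          ((0:ℤ), (none : Option ℤ))) := by
      rw [PySem.List.pyRange_neg_one_eq_reverse]
      rw [show ((-1:ℤ) + 1) = 0 from by norm_num,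
          show ((arr.length:ℤ) - (kn:ℤ) - 1 + 1) = (arr.length:ℤ) - (kn:ℤ) from by ring]
      rw [PySem.List.pyRange_one]
      rw [show (((arr.length:ℤ) - (kn:ℤ)) - 0).toNat = arr.length - kn from by omega]
      rw [← List.map_reverse, List.foldl_map]
      apply PySem.List.foldl_congr_mem
      intro bm t htmem
      have ht : t < arr.length - kn := by
        have := List.mem_reverse.mp htmem
        exact List.mem_range.mp this
      simp only []
      have e1 : min (((0:ℤ) + (t:ℤ)) + (kn:ℤ) + (kn:ℤ)) (arr.length:ℤ)
          = ((min (t + kn + kn) arr.length : ℕ) : ℤ) := by push_cast; omega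
      have e2 : ((0:ℤ) + (t:ℤ)) + (kn:ℤ) = (((t + kn : ℕ)):ℤ) := by omega
      have e3 : min (max (((0:ℤ) + (t:ℤ)) + (kn:ℤ) + (kn:ℤ) - (arr.length:ℤ)) 0) (arr.length:ℤ)
          = ((min (t + kn + kn - arr.length) arr.length : ℕ) : ℤ) := by push_cast; omega
      have e4 : ((0:ℤ) + (t:ℤ)) = (((t : ℕ)):ℤ) := by omega
      rw [e1, e3]
      rw [e2, e4]
      rw [hpfx (min (t + kn + kn) arr.length) (by omega),
          hpfx (t + kn) (by omega),
          hpfx (min (t + kn + kn - arr.length) arr.length) (by omega),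
          hpfx t (by omega)]
      have hwval : (arr.take (min (t + kn + kn) arr.length)).sum - (arr.take (t + kn)).sum
          + (arr.take (min (t + kn + kn - arr.length) arr.length)).sum = pvW arr kn (t + kn) := by
        rw [show arr.take (min (t + kn + kn) arr.length) = arr.take (t + kn + kn) from by
              rw [← List.take_take, List.take_length],
            show arr.take (min (t + kn + kn - arr.length) arr.length)
               = arr.take (t + kn + kn - arr.length) from by
              rw [← List.take_take, List.take_length]]
        rw [show t + kn + kn = (t + kn) + kn from rfl, pvTake_sub]
        rfl
      have hsval : (arr.take (t + kn)).sum - (arr.take t).sum = pvS arr kn t := pvTake_sub arr kn t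
      rw [hwval, hsval]
    rw [hB]
    have hbinv := pvBInv arr kn hkn (arr.length - kn) 0 (le_refl _)
    rw [if_pos rfl] at hbinv
    rw [hbinv, pvFmax_reverse]
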